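/- GENERATED by tools/from_farm_form.py from prooffarm-gif/accepted/GifFreeSavedImages.2/Proof.lean (a worked proof of the farm's unit `GifFreeSavedImages.2`,
   accepted by the verdict) — do not edit. -/
import Gif.Spec.Units.GifFreeSavedImages_2
import Gif.Spec.AllSegs
import Gif.Spec.Proved.GifFreeSavedImages_2_Lemmas

open X86 X86.User Asan ProgX.Base ProgX.Base.Spec Gif.Spec Gif.Spec.GifFreeSavedImages

/-!
  `GifFreeSavedImages.2` (0x107f07 … 0x107f87, entered at the loop head 0x107f18; 31 instructions; gifalloc.c:438-449): ONE ROUND of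
  the loop of `GifFreeSavedImages`, or its exit.

      107F18H  head      the checked loads of `gif.SavedImages`, `gif.ImageCount`; `sp >= end` → 107F87H   `fs2_head_exit`  (k = length)
      107F46H            the checked load of `sp->ImageDesc.ColorMap`; NULL → 107F6EH                     `fs2_head_none`
                         otherwise `GifFreeMapObject`, the checked store of NULL → 107F6EH                `fs2_head_some`
      107F6EH  fs2_cut2  the checked load of `sp->RasterBits`; NULL → 107F07H                             `fs2_raster_none`
                         otherwise `free` → 107F07H                                                       `fs2_raster_some`
      107F07H  fs2_cut3  `GifFreeExtensions(&sp->ExtensionBlockCount, &sp->ExtensionBlocks)`, `sp++` → 107F18H   `fs2_latch`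

  Between the head and the latch the private assertion `fs2_Mid` (Lemmas.lean §2) holds: the head's assertion for the state the
  round started at, the heap with the pointers freed so far, what is still live, and the windows written since the head — each
  loose for the head's heap and forest, or the colour-map field of slot `k` (which holds NULL). The shape of the forest after
  `k + 1` rounds is concluded ONCE, at the latch (`fs2_round_shape`: `Shape.set_saved` with `fs2_savedAt_round`).
-/

/-- Segment 2 of `GifFreeSavedImages` takes `Head k` to `Head (k + 1)` (a round) or to `AtExit` (`k = length`). -/
theorem Gif.Spec.Proved.GifFreeSavedImages_2_ok : Gif.Spec.GifFreeSavedImages_2.Statement := by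
  intro Lay hLay μ hμ u₀ hcode h_fm h_free h_fe h_load8 h_load4 h_store8 H rest frames F R s k e ret v hat
  by_cases hk : k < s.imgs.length
  · -- A ROUND: slot `k` is a counted one
    refine ReachVia.mono ?_ (fun w hw => Or.inl hw)
    -- 0x107f18 … 0x107f6e: the colour map of slot `k`
    have hA : ReachVia Lay μ ProgX.Base.WayInv v
        (Gif.Spec.GifFreeSavedImages_2.fs2_Mid Gif.Spec.GifFreeSavedImages_2.fs2_cut2
          ((Map.objs s.imgs[k].cm).map Prod.fst) (rasterObjs s.imgs[k].raster ++ Exts.objs s.imgs[k].ext)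
          H rest frames F R s k u₀ e ret v) := by
      rcases Option.eq_none_or_eq_some s.imgs[k].cm with hcm | ⟨m, hcm⟩
      · rw [hcm]
        exact Gif.Spec.GifFreeSavedImages_2.fs2_head_none Lay hLay μ hμ u₀ hcode h_load8 h_load4 H rest frames F R s k e ret v
          hat hk hcm
      · rw [hcm]
        exact Gif.Spec.GifFreeSavedImages_2.fs2_head_some Lay hLay μ hμ u₀ hcode h_load8 h_load4 h_store8 H rest frames F R s k
          e ret v hat hk m hcm (h_fm (heapAt H s k) rest frames m.colors (3 * m.count))
    refine hA.trans ?_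
    intro v1 hv1
    -- 0x107f6e … 0x107f07: the raster of slot `k`
    have hC : ReachVia Lay μ ProgX.Base.WayInv v1
        (Gif.Spec.GifFreeSavedImages_2.fs2_Mid Gif.Spec.GifFreeSavedImages_2.fs2_cut3
          ((Map.objs s.imgs[k].cm).map Prod.fst ++ (rasterObjs s.imgs[k].raster).map Prod.fst) (Exts.objs s.imgs[k].ext)
          H rest frames F R s k u₀ e ret v) := by
      rcases Option.eq_none_or_eq_some s.imgs[k].raster with hr | ⟨r, hr⟩
      · exact Gif.Spec.GifFreeSavedImages_2.fs2_raster_none Lay hLay μ hμ u₀ hcode h_load8 H rest frames F R s k e ret v v1 hk _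
          hr hv1
      · exact Gif.Spec.GifFreeSavedImages_2.fs2_raster_some Lay hLay μ hμ u₀ hcode h_load8 H rest frames F R s k e ret v v1 hk _
          r hr (h_free _ rest frames r.2) hv1
    refine hC.trans ?_
    intro v2 hv2
    -- 0x107f07 … 0x107f18: the extension list of slot `k`, `sp++`
    exact Gif.Spec.GifFreeSavedImages_2.fs2_latch Lay hLay μ hμ u₀ hcode H rest frames F R s k e ret v v2 hk _
      (Gif.Spec.GifFreeSavedImages_2.fs2_heap_round H s k hk) (h_fe _ rest frames s.imgs[k].ext s.arr (56 * s.cap)) hv2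
  · -- THE EXIT: every slot is done
    have hle := hat.loop.le
    have hkk : k = s.imgs.length := by
      omega
    subst hkk
    refine ReachVia.mono ?_ (fun w hw => Or.inr hw)
    exact Gif.Spec.GifFreeSavedImages_2.fs2_head_exit Lay hLay μ hμ u₀ hcode h_load8 h_load4 H rest frames F R s e ret v hat
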